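-- pv_equiv track=rewrite | github.com/FOMARTEM/IB-RSA-13 | teeeest.py | find_distances
-- ===== SOURCE A (Python) =====
-- from collections import defaultdict
--
-- def find_distances(text, n):
--     m = defaultdict(list)
--
--     for i in range(len(text)-n+1):
--         s = text[i:i+n]
--         m[s].append(i)
--
--     res = []
--
--     for v in m.values():
--         if len(v) > 1:
--             for i in range(len(v)-1):
--                 res.append(v[i+1]-v[i])
--
--     return res
-- ===== SOURCE B (Python) =====
-- def find_distances(text, n):
--     # One pass: keep only the last position of each n-gram and emit each gap
--     # as it appears, grouped per n-gram in first-occurrence order.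
--     last = {}
--     gaps = {}
--     for i in range(len(text) - n + 1):
--         s = text[i:i+n]
--         if s in last:
--             gaps[s].append(i - last[s])
--         else:
--             gaps[s] = []
--         last[s] = i
--     out = []
--     for lst in gaps.values():
--         out.extend(lst)
--     return out
-- ===== Notes on version B (the rewrite author's own statement) =====
-- stated objective: alternative
-- what changed: B replaces A's two-phase grouping (collect all positions per n-gram, then a second nested loop computing consecutive differences) by a single pass that keeps only the last position of each n-gram and emits each gap immediately into a per-n-gram list, flattened at the end.
import Mathlib
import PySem

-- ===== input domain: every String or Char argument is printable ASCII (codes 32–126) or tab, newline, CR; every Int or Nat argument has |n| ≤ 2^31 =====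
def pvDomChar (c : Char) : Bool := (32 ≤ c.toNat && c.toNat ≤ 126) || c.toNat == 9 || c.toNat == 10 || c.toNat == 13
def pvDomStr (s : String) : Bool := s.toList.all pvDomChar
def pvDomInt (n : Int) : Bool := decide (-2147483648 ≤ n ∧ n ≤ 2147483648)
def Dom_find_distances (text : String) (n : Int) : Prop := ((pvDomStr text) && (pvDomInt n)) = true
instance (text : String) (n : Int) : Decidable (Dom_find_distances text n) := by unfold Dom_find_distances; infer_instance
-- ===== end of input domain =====

-- B is an alternative one-pass decomposition (keep only the last position per n-gram and
-- emit each gap online, per key, in first-occurrence order); same return value as A.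

-- ===== PORT A =====
-- indices i and i+1 in the inner loop are always in range, so pyGetD with default 0 is exact
def find_distances (text : String) (n : Int) : List Int :=
  let cs := text.toList
  let m : PySem.Dict (List Char) (List Int) :=
    (PySem.List.pyRange 0 ((cs.length : Int) - n + 1) 1).foldl
      (fun d i => d.modify (PySem.List.slice cs (some i) (some (i + n))) [] (· ++ [i]))
      PySem.Dict.empty
  m.values.foldl
    (fun res v =>
      if (1 : Int) < (v.length : Int) then
        res ++ (PySem.List.pyRange 0 ((v.length : Int) - 1) 1).foldl
          (fun r i => r ++ [PySem.List.pyGetD v (i + 1) 0 - PySem.List.pyGetD v i 0]) []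
      else res)
    []

-- ===== PORT B =====
def find_distances_alt (text : String) (n : Int) : List Int :=
  let cs := text.toList
  let st :=
    (PySem.List.pyRange 0 ((cs.length : Int) - n + 1) 1).foldl
      (fun (p : PySem.Dict (List Char) Int × PySem.Dict (List Char) (List Int)) i =>
        match p.1.get? (PySem.List.slice cs (some i) (some (i + n))) with
        | some j => (p.1.insert (PySem.List.slice cs (some i) (some (i + n))) i,
                     p.2.modify (PySem.List.slice cs (some i) (some (i + n))) [] (· ++ [i - j]))
        | none => (p.1.insert (PySem.List.slice cs (some i) (some (i + n))) i,
                   p.2.insert (PySem.List.slice cs (some i) (some (i + n))) []))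
      (PySem.Dict.empty, PySem.Dict.empty)
  st.2.values.foldl (fun out lst => out ++ lst) []

-- ===== PRECONDITION & SPEC =====
def Spec_find_distances (text : String) (n : Int) (out : List Int) : Prop := out = find_distances_alt text n
instance (text : String) (n : Int) (out : List Int) : Decidable (Spec_find_distances text n out) := by unfold Spec_find_distances; infer_instance

-- ===== CLAIM (what is proved, stated in full; the proofs are below) =====
def Claim_equal_find_distances : Prop := ∀ (text : String) (n : Int), Dom_find_distances text n → Spec_find_distances text n (find_distances text n)

-- ===== LEMMAS AND PROOFS =====

-- consecutive differences of a position list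
def pvDiffs : List Int → List Int
  | a :: b :: t => (b - a) :: pvDiffs (b :: t)
  | _ => []

theorem pvDiffs_append (v : List Int) (hv : v ≠ []) (i : Int) :
    pvDiffs (v ++ [i]) = pvDiffs v ++ [i - v.getLastD 0] := by
  induction v with
  | nil => exact absurd rfl hv
  | cons a t ih =>
    cases t with
    | nil => simp [pvDiffs]
    | cons b t' =>
      have h := ih (by simp)
      show (b - a) :: pvDiffs ((b :: t') ++ [i]) = ((b - a) :: pvDiffs (b :: t')) ++ _
      rw [h]
      simp

theorem pvDiffs_short (v : List Int) (h : ¬ (1 : Int) < (v.length : Int)) : pvDiffs v = [] := by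
  match v with
  | [] => rfl
  | [a] => rfl
  | a :: b :: t => simp at h

theorem pv_foldl_app {α β : Type} (l : List α) (g : α → β) (acc : List β) :
    l.foldl (fun r i => r ++ [g i]) acc = acc ++ l.map g := by
  induction l generalizing acc with
  | nil => simp
  | cons a t ih => simp [List.foldl_cons, ih]

theorem pv_getD_range (v : List Int) :
    (List.range (v.length - 1)).map (fun k => v.getD (k + 1) 0 - v.getD k 0) = pvDiffs v := by
  induction v with
  | nil => simp [pvDiffs]
  | cons a t ih =>
    cases t with
    | nil => simp [pvDiffs]
    | cons b t' =>
      have h1 : (a :: b :: t').length - 1 = t'.length + 1 := by simp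
      rw [h1, List.range_succ_eq_map, List.map_cons, List.map_map]
      have h2 : (b :: t').length - 1 = t'.length := by simp
      rw [h2] at ih
      show _ :: _ = (b - a) :: pvDiffs (b :: t')
      rw [← ih]
      congr 1

theorem pv_inner_eq_pvDiffs (v : List Int) :
    (PySem.List.pyRange 0 ((v.length : Int) - 1) 1).foldl
      (fun r i => r ++ [PySem.List.pyGetD v (i + 1) 0 - PySem.List.pyGetD v i 0]) []
    = pvDiffs v := by
  rw [PySem.List.pyRange_one, List.foldl_map, pv_foldl_app, List.nil_append]
  have hN : (((v.length : Int) - 1) - 0).toNat = v.length - 1 := by omega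
  rw [hN, ← pv_getD_range v]
  apply List.map_congr_left
  intro k _
  have e1 : (0 : Int) + (k : Int) + 1 = ((k + 1 : Nat) : Int) := by push_cast; ring
  have e2 : (0 : Int) + (k : Int) = ((k : Nat) : Int) := by ring
  rw [e1, e2, PySem.List.pyGetD_natCast, PySem.List.pyGetD_natCast]

-- find? through a value-only map of an association list
theorem pv_find?_map {κ ν₁ ν₂ : Type} [BEq κ] (g : ν₁ → ν₂) (s : κ) (l : List (κ × ν₁)) :
    List.find? (fun p => p.1 == s) (l.map (fun p => (p.1, g p.2)))
      = (List.find? (fun p => p.1 == s) l).map (fun p => (p.1, g p.2)) := by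
  induction l with
  | nil => simp
  | cons a t ih =>
    by_cases h : (a.1 == s) = true
    · simp [h]
    · simp only [List.map_cons, List.find?_cons]
      simp only [h]
      simpa using ih

theorem pv_get?_rel {κ ν₁ ν₂ : Type} [BEq κ] (D₂ : PySem.Dict κ ν₂) (D₁ : PySem.Dict κ ν₁)
    (g : ν₁ → ν₂) (h : D₂.items = D₁.items.map (fun p => (p.1, g p.2))) (s : κ) :
    D₂.get? s = (D₁.get? s).map g := by
  simp only [PySem.Dict.get?, h, pv_find?_map]
  cases List.find? (fun p => p.1 == s) D₁.items <;> simp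

theorem pv_contains_rel {κ ν₁ ν₂ : Type} [BEq κ] (D₂ : PySem.Dict κ ν₂) (D₁ : PySem.Dict κ ν₁)
    (g : ν₁ → ν₂) (h : D₂.items = D₁.items.map (fun p => (p.1, g p.2))) (s : κ) :
    D₂.contains s = D₁.contains s := by
  rw [PySem.Dict.contains_eq_isSome_get?, PySem.Dict.contains_eq_isSome_get?,
    pv_get?_rel D₂ D₁ g h s]
  cases D₁.get? s <;> simp

-- the loop invariant tying A's position dict to B's (last, gaps) pair
def pvInv (m : PySem.Dict (List Char) (List Int)) (last : PySem.Dict (List Char) Int)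
    (diffs : PySem.Dict (List Char) (List Int)) : Prop :=
  m.keys.Nodup ∧ (∀ p ∈ m.items, p.2 ≠ []) ∧
  last.items = m.items.map (fun p => (p.1, p.2.getLastD 0)) ∧
  diffs.items = m.items.map (fun p => (p.1, pvDiffs p.2))

theorem pv_step (s : List Char) (i : Int) (m : PySem.Dict (List Char) (List Int))
    (last : PySem.Dict (List Char) Int) (diffs : PySem.Dict (List Char) (List Int))
    (h : pvInv m last diffs) :
    pvInv (m.modify s [] (· ++ [i]))
      (match last.get? s with
       | some _ => last.insert s i
       | none => last.insert s i)
      (match last.get? s with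
       | some j => diffs.modify s [] (· ++ [i - j])
       | none => diffs.insert s []) := by
  obtain ⟨hnd, hne, hlast, hdiffs⟩ := h
  have hgl := pv_get?_rel last m (fun v => v.getLastD 0) hlast s
  have hgd := pv_get?_rel diffs m (fun v => pvDiffs v) hdiffs s
  have hcl := pv_contains_rel last m (fun v => v.getLastD 0) hlast s
  have hcd := pv_contains_rel diffs m (fun v => pvDiffs v) hdiffs s
  cases h1 : m.get? s with
  | some v =>
    have hvmem : (s, v) ∈ m.items := PySem.Dict.mem_items_of_get?_eq_some m h1
    have hvne : v ≠ [] := hne _ hvmem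
    have hc : m.contains s = true := by
      rw [PySem.Dict.contains_eq_isSome_get?, h1]; rfl
    have hlg : last.get? s = some (v.getLastD 0) := by rw [hgl, h1]; rfl
    have hdg : diffs.get? s = some (pvDiffs v) := by rw [hgd, h1]; rfl
    rw [hlg]
    have hmD : m.getD s [] = v := by simp [PySem.Dict.getD, h1]
    have hdD : diffs.getD s [] = pvDiffs v := by simp [PySem.Dict.getD, hdg]
    simp only [PySem.Dict.modify, hmD, hdD]
    have hmi := PySem.Dict.items_insert_of_contains m (v ++ [i]) hc
    have hli := PySem.Dict.items_insert_of_contains last i (by rw [hcl]; exact hc)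
    have hdi := PySem.Dict.items_insert_of_contains diffs
      (pvDiffs v ++ [i - v.getLastD 0]) (by rw [hcd]; exact hc)
    refine ⟨?_, ?_, ?_, ?_⟩
    · have : (m.insert s (v ++ [i])).keys = m.keys := by
        simp only [PySem.Dict.keys, hmi, List.map_map]
        apply List.map_congr_left
        intro p _
        by_cases hp : (p.1 == s) = true
        · simp [Function.comp, hp]; exact (beq_iff_eq.mp hp).symm
        · simp [Function.comp, hp]
      rw [this]; exact hnd
    · intro p hp
      rw [hmi] at hp
      obtain ⟨q, hq, hqe⟩ := List.mem_map.mp hp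
      by_cases hqs : (q.1 == s) = true
      · simp only [hqs, if_pos] at hqe; rw [← hqe]; simp
      · simp only [hqs] at hqe
        rw [← hqe]; exact hne _ hq
    · rw [hli, hmi, hlast, List.map_map, List.map_map]
      apply List.map_congr_left
      intro p _
      by_cases hp : (p.1 == s) = true
      · simp [Function.comp, hp]
      · simp [Function.comp, hp]
    · rw [hdi, hmi, hdiffs, List.map_map, List.map_map]
      apply List.map_congr_left
      intro p _
      by_cases hp : (p.1 == s) = true
      · simp only [Function.comp, hp, if_pos]
        simp [pvDiffs_append v hvne i]
      · simp [Function.comp, hp]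
  | none =>
    have hc : m.contains s = false := by
      rw [PySem.Dict.contains_eq_isSome_get?, h1]; rfl
    have hlg : last.get? s = none := by rw [hgl, h1]; rfl
    rw [hlg]
    have hmD : m.getD s [] = [] := by simp [PySem.Dict.getD, h1]
    simp only [PySem.Dict.modify, hmD, List.nil_append]
    have hmi := PySem.Dict.items_insert_of_not_contains m [i] hc
    have hli := PySem.Dict.items_insert_of_not_contains last i (by rw [hcl]; exact hc)
    have hdi := PySem.Dict.items_insert_of_not_contains diffs [] (by rw [hcd]; exact hc)
    have hsnot : s ∉ m.keys := by
      intro hmem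
      rw [PySem.Dict.contains_eq_decide_mem_keys] at hc
      simp [hmem] at hc
    refine ⟨?_, ?_, ?_, ?_⟩
    · have : (m.insert s [i]).keys = m.keys ++ [s] := by
        simp [PySem.Dict.keys, hmi]
      rw [this]
      refine List.Nodup.append hnd (List.nodup_singleton s) ?_
      intro a ha hb
      simp only [List.mem_singleton] at hb
      exact hsnot (hb ▸ ha)
    · intro p hp
      rw [hmi] at hp
      rcases List.mem_append.mp hp with h' | h'
      · exact hne _ h'
      · simp at h'; rw [h']; simp
    · rw [hli, hmi, hlast]; simp
    · rw [hdi, hmi, hdiffs]; simp [pvDiffs]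

theorem pv_loop (key : Int → List Char) (l : List Int)
    (m : PySem.Dict (List Char) (List Int)) (last : PySem.Dict (List Char) Int)
    (diffs : PySem.Dict (List Char) (List Int)) (h : pvInv m last diffs) :
    pvInv (l.foldl (fun d i => d.modify (key i) [] (· ++ [i])) m)
      (l.foldl (fun (p : PySem.Dict (List Char) Int × PySem.Dict (List Char) (List Int)) i =>
        match p.1.get? (key i) with
        | some j => (p.1.insert (key i) i, p.2.modify (key i) [] (· ++ [i - j]))
        | none => (p.1.insert (key i) i, p.2.insert (key i) [])) (last, diffs)).1
      (l.foldl (fun (p : PySem.Dict (List Char) Int × PySem.Dict (List Char) (List Int)) i =>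
        match p.1.get? (key i) with
        | some j => (p.1.insert (key i) i, p.2.modify (key i) [] (· ++ [i - j]))
        | none => (p.1.insert (key i) i, p.2.insert (key i) [])) (last, diffs)).2 := by
  induction l generalizing m last diffs with
  | nil => exact h
  | cons a t ih =>
    simp only [List.foldl_cons]
    have hstep := pv_step (key a) a m last diffs h
    cases hlg : last.get? (key a) with
    | some j =>
      rw [hlg] at hstep
      exact ih _ _ _ hstep
    | none =>
      rw [hlg] at hstep
      exact ih _ _ _ hstep

theorem find_distances_spec : Claim_equal_find_distances := by
  intro text n _
  unfold Spec_find_distances find_distances find_distances_alt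
  simp only []
  set cs := text.toList with hcs
  set key : Int → List Char := fun i => PySem.List.slice cs (some i) (some (i + n)) with hkey
  have hinv := pv_loop key (PySem.List.pyRange 0 ((cs.length : Int) - n + 1) 1)
    PySem.Dict.empty PySem.Dict.empty PySem.Dict.empty
    (by refine ⟨?_, ?_, ?_, ?_⟩ <;> simp [PySem.Dict.empty, PySem.Dict.keys])
  set mf := (PySem.List.pyRange 0 ((cs.length : Int) - n + 1) 1).foldl
    (fun d i => d.modify (key i) [] (· ++ [i])) PySem.Dict.empty with hmf
  set pf := (PySem.List.pyRange 0 ((cs.length : Int) - n + 1) 1).foldl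
    (fun (p : PySem.Dict (List Char) Int × PySem.Dict (List Char) (List Int)) i =>
      match p.1.get? (key i) with
      | some j => (p.1.insert (key i) i, p.2.modify (key i) [] (· ++ [i - j]))
      | none => (p.1.insert (key i) i, p.2.insert (key i) [])) (PySem.Dict.empty, PySem.Dict.empty)
    with hpf
  obtain ⟨_, _, _, hdiffs⟩ := hinv
  have hvals : pf.2.values = mf.values.map pvDiffs := by
    simp only [PySem.Dict.values, hdiffs, List.map_map]; rfl
  have hfun : (fun (res : List Int) (v : List Int) =>
      if (1 : Int) < (v.length : Int) then
        res ++ (PySem.List.pyRange 0 ((v.length : Int) - 1) 1).foldl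
          (fun r i => r ++ [PySem.List.pyGetD v (i + 1) 0 - PySem.List.pyGetD v i 0]) []
      else res)
      = fun res v => res ++ pvDiffs v := by
    funext res v
    split_ifs with h
    · rw [pv_inner_eq_pvDiffs]
    · rw [pvDiffs_short v h, List.append_nil]
  rw [hfun, hvals, List.foldl_map]
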